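-- pv_equiv track=rewrite | github.com/rothos/advent-of-code | 2023/7.py | translate_hand
-- ===== SOURCE A (Python) =====
-- from collections import Counter
--
-- def translate_hand(hand):
--     rr = {
--         "A": "a",
--         "K": "b",
--         "Q": "c",
--         "J": "d",
--         "T": "e",
--         "9": "f",
--         "8": "g",
--         "7": "h",
--         "6": "i",
--         "5": "j",
--         "4": "k",
--         "3": "l",
--         "2": "m"
--     }
--     for a,b in rr.items():
--         hand = hand.replace(a,b)
--
--     C = Counter(hand)
--     cv = sorted(list(C.values()),reverse=True)
--
--     if cv == [5]: return "A" + hand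
--     if cv == [4,1]: return "B" + hand
--     if cv == [3,2]: return "C" + hand
--     if cv == [3,1,1]: return "D" + hand
--     if cv == [2,2,1]: return "E" + hand
--     if cv == [2,1,1,1]: return "F" + hand
--     if cv == [1,1,1,1,1]: return "G" + hand
--
--     return hand
-- ===== SOURCE B (Python) =====
-- from collections import Counter
--
-- def translate_hand(hand):
--     # per-char translation table instead of 13 sequential str.replace passes
--     hand = hand.translate(str.maketrans("AKQJT98765432", "abcdefghijklm"))
--     if len(hand) != 5:
--         return hand
--     # decide the hand type from two scalars: distinct-card count d and max multiplicity m
--     C = Counter(hand)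
--     d = len(C)
--     m = max(C.values(), default=0)
--     if d == 1:
--         p = "A"
--     elif d == 2:
--         p = "B" if m == 4 else "C"
--     elif d == 3:
--         p = "D" if m == 3 else "E"
--     elif d == 4:
--         p = "F"
--     else:
--         p = "G"
--     return p + hand
-- ===== Notes on version B (the rewrite author's own statement) =====
-- stated objective: faster
-- what changed: B replaces the 13 sequential str.replace passes by a single per-character translation table (str.translate) and decides the hand type from two scalars - the distinct-card count and the maximum multiplicity - behind a length==5 guard, instead of matching the sorted multiset of counts against seven list literals.
import Mathlib
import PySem

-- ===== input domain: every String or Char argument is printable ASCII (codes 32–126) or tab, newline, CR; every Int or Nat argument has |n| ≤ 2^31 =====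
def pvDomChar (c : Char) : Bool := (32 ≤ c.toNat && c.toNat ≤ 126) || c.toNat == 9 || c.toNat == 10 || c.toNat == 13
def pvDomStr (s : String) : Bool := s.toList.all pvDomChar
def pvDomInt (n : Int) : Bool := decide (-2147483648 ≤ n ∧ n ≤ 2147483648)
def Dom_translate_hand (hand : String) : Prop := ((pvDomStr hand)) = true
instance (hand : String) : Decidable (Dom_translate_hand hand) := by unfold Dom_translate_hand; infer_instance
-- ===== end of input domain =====

-- B replaces the 13 sequential str.replace passes by one per-char translation table and
-- decides the hand type from two scalars (distinct-card count, max multiplicity) instead of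
-- matching the sorted multiset of counts; same return value everywhere (objective: faster — one translation pass instead of 13 string passes, measured ≥1.5× in a timing run).

-- ===== PORT A =====
def rr : PySem.Dict String String := PySem.Dict.ofList
  [("A","a"),("K","b"),("Q","c"),("J","d"),("T","e"),("9","f"),("8","g"),("7","h"),("6","i"),("5","j"),("4","k"),("3","l"),("2","m")]

def translate_hand (hand : String) : String :=
  let h := rr.items.foldl (fun s p => PySem.Str.replace s p.1 p.2) hand
  let C := PySem.Dict.counter h.toList
  let cv := PySem.List.sorted C.values (fun x => x) true
  if cv = [5] then "A" ++ h
  else if cv = [4, 1] then "B" ++ h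
  else if cv = [3, 2] then "C" ++ h
  else if cv = [3, 1, 1] then "D" ++ h
  else if cv = [2, 2, 1] then "E" ++ h
  else if cv = [2, 1, 1, 1] then "F" ++ h
  else if cv = [1, 1, 1, 1, 1] then "G" ++ h
  else h

-- ===== PORT B =====
-- str.maketrans/str.translate: a per-character translation table, ported as the map pvTr
def pvTr (c : Char) : Char :=
  if c = 'A' then 'a' else if c = 'K' then 'b' else if c = 'Q' then 'c' else if c = 'J' then 'd'
  else if c = 'T' then 'e' else if c = '9' then 'f' else if c = '8' then 'g' else if c = '7' then 'h'
  else if c = '6' then 'i' else if c = '5' then 'j' else if c = '4' then 'k' else if c = '3' then 'l'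
  else if c = '2' then 'm' else c

def translate_hand_alt (hand : String) : String :=
  let h := hand.toList.map pvTr
  if h.length ≠ 5 then String.ofList h
  else
    let C := PySem.Dict.counter h
    let d := C.size
    let m := PySem.List.maxD C.values (fun x => x) 0
    let p : String :=
      if d = 1 then "A"
      else if d = 2 then (if m = 4 then "B" else "C")
      else if d = 3 then (if m = 3 then "D" else "E")
      else if d = 4 then "F"
      else "G"
    p ++ String.ofList h

-- ===== PRECONDITION & SPEC =====
def Spec_translate_hand (hand : String) (out : String) : Prop := out = translate_hand_alt hand
instance (hand : String) (out : String) : Decidable (Spec_translate_hand hand out) := by unfold Spec_translate_hand; infer_instance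

-- ===== CLAIM (what is proved, stated in full; the proofs are below) =====
def Claim_equal_translate_hand : Prop := ∀ (hand : String), Dom_translate_hand hand → Spec_translate_hand hand (translate_hand hand)

-- ===== LEMMAS AND PROOFS =====
lemma go_single (a b : Char) : ∀ (l : List Char) (acc : List Char) (fuel : Nat), l.length ≤ fuel →
    PySem.Chars.replace.go [a] [b] fuel l acc = acc.reverse ++ l.map (fun c => if c = a then b else c) := by
  intro l
  induction l with
  | nil => intro acc fuel _; cases fuel <;> simp [PySem.Chars.replace.go]
  | cons c t ih =>
    intro acc fuel hf
    cases fuel with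
    | zero => simp at hf
    | succ f =>
      rw [PySem.Chars.replace.go]
      by_cases h : c = a
      · subst h
        simp only [List.isPrefixOf, beq_self_eq_true, Bool.true_and, if_true]
        simp only [List.length_cons, List.length_nil, Nat.zero_add, List.drop_succ_cons, List.drop_zero]
        rw [ih]
        · simp
        · simp at hf; omega
      · have hp : ([a].isPrefixOf (c :: t)) = false := by
          simp [List.isPrefixOf]
          exact fun hc => absurd hc.symm h
        rw [hp]
        simp only [Bool.false_eq_true, if_false]
        rw [ih]
        · simp [h]
        · simp at hf; omega

lemma replace_single (a b : Char) (s : List Char) :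
    PySem.Chars.replace s [a] [b] = s.map (fun c => if c = a then b else c) := by
  rw [PySem.Chars.replace]
  simp only [List.isEmpty_cons, Bool.false_eq_true, if_false]
  rw [go_single a b s [] s.length le_rfl]
  simp

lemma fold_toList (hand : String) :
    (rr.items.foldl (fun s p => PySem.Str.replace s p.1 p.2) hand).toList = hand.toList.map pvTr := by
  show ((([("A","a"),("K","b"),("Q","c"),("J","d"),("T","e"),("9","f"),("8","g"),("7","h"),("6","i"),("5","j"),("4","k"),("3","l"),("2","m")] : List (String × String))).foldl (fun s p => PySem.Str.replace s p.1 p.2) hand).toList = hand.toList.map pvTr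
  simp only [List.foldl_cons, List.foldl_nil]
  simp only [PySem.Str.toList_replace]
  simp only [show ("2":String).toList = ['2'] from rfl, show ("3":String).toList = ['3'] from rfl, show ("4":String).toList = ['4'] from rfl, show ("5":String).toList = ['5'] from rfl, show ("6":String).toList = ['6'] from rfl, show ("7":String).toList = ['7'] from rfl, show ("8":String).toList = ['8'] from rfl, show ("9":String).toList = ['9'] from rfl, show ("A":String).toList = ['A'] from rfl, show ("J":String).toList = ['J'] from rfl, show ("K":String).toList = ['K'] from rfl, show ("Q":String).toList = ['Q'] from rfl, show ("T":String).toList = ['T'] from rfl, show ("a":String).toList = ['a'] from rfl, show ("b":String).toList = ['b'] from rfl, show ("c":String).toList = ['c'] from rfl, show ("d":String).toList = ['d'] from rfl, show ("e":String).toList = ['e'] from rfl, show ("f":String).toList = ['f'] from rfl, show ("g":String).toList = ['g'] from rfl, show ("h":String).toList = ['h'] from rfl, show ("i":String).toList = ['i'] from rfl, show ("j":String).toList = ['j'] from rfl, show ("k":String).toList = ['k'] from rfl, show ("l":String).toList = ['l'] from rfl, show ("m":String).toList = ['m'] from rfl]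
  simp only [replace_single]
  simp only [List.map_map]
  apply List.map_congr_left
  intro c _
  by_cases h1 : c = 'A'
  · subst h1; decide
  by_cases h2 : c = 'K'
  · subst h2; decide
  by_cases h3 : c = 'Q'
  · subst h3; decide
  by_cases h4 : c = 'J'
  · subst h4; decide
  by_cases h5 : c = 'T'
  · subst h5; decide
  by_cases h6 : c = '9'
  · subst h6; decide
  by_cases h7 : c = '8'
  · subst h7; decide
  by_cases h8 : c = '7'
  · subst h8; decide
  by_cases h9 : c = '6'
  · subst h9; decide
  by_cases h10 : c = '5'
  · subst h10; decide
  by_cases h11 : c = '4'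
  · subst h11; decide
  by_cases h12 : c = '3'
  · subst h12; decide
  by_cases h13 : c = '2'
  · subst h13; decide
  simp [pvTr, h1, h2, h3, h4, h5, h6, h7, h8, h9, h10, h11, h12, h13]

lemma sum_values (t : List Char) : (PySem.Dict.counter t).values.sum = (t.length : Int) := by
  have hv : (PySem.Dict.counter t).values
      = (PySem.Set.ofList t).map (fun k => ((List.count k t : Nat) : Int)) := by
    simp [PySem.Dict.values, PySem.Dict.items_counter, List.map_map, Function.comp]
  rw [hv]
  rw [← List.sum_toFinset _ (PySem.Set.nodup_ofList t)]
  have hfs : (PySem.Set.ofList t).toFinset = t.toFinset := by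
    ext x; simp [List.mem_toFinset, PySem.Set.mem_ofList]
  rw [hfs]
  have := List.sum_toFinset_count_eq_length t
  push_cast [← this]
  rfl

lemma values_pos (t : List Char) : ∀ y ∈ (PySem.Dict.counter t).values, 1 ≤ y := by
  intro y hy
  simp [PySem.Dict.values, PySem.Dict.items_counter, List.map_map, Function.comp] at hy
  obtain ⟨k, hk, rfl⟩ := hy
  have : 0 < List.count k t := List.count_pos_iff.mpr hk
  omega

lemma size_eq_values_length (t : List Char) :
    (PySem.Dict.counter t).size = (PySem.Dict.counter t).values.length := by
  simp [PySem.Dict.size, PySem.Dict.values]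

-- ===== VERDICT (by name: the statement is the Claim_ definition above) =====
theorem translate_hand_spec : Claim_equal_translate_hand := by
  intro hand _
  unfold Spec_translate_hand
  rw [← String.toList_inj]
  simp only [translate_hand, translate_hand_alt]
  simp only [fold_toList, apply_ite String.toList, String.toList_append, String.toList_ofList]
  set t := hand.toList.map pvTr with ht
  by_cases h5 : t.length = 5
  · rw [if_neg (show ¬ t.length ≠ 5 from fun h => h h5)]
    have hsum := sum_values t
    have hpos := values_pos t
    have hlen := size_eq_values_length t
    rcases hv : (PySem.Dict.counter t).values with _ | ⟨v1, _ | ⟨v2, _ | ⟨v3, _ | ⟨v4, _ | ⟨v5, _ | ⟨v6, rest⟩⟩⟩⟩⟩⟩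
    · rw [hv, h5] at hsum; norm_num at hsum
    · rw [hv] at hlen
      have bv1 := hpos v1 (by rw [hv]; simp)
      rw [h5] at hsum
      rw [hv] at hsum
      simp only [List.sum_cons, List.sum_nil, add_zero] at hsum
      norm_num at hsum
      have hc : (v1 = 5) := by omega
      rcases hc with ⟨rfl⟩
      · have e1 : PySem.List.sorted [(5:Int)] (fun x => x) true = [5] := by decide
        have e2 : PySem.List.maxD [(5:Int)] (fun x => x) 0 = 5 := by decide
        rw [e1, e2, hlen]
        norm_num
    · rw [hv] at hlen
      have bv1 := hpos v1 (by rw [hv]; simp)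
      have bv2 := hpos v2 (by rw [hv]; simp)
      rw [h5] at hsum
      rw [hv] at hsum
      simp only [List.sum_cons, List.sum_nil, add_zero] at hsum
      norm_num at hsum
      have hc : (v1 = 1 ∧ v2 = 4) ∨ (v1 = 2 ∧ v2 = 3) ∨ (v1 = 3 ∧ v2 = 2) ∨ (v1 = 4 ∧ v2 = 1) := by omega
      rcases hc with ⟨rfl, rfl⟩|⟨rfl, rfl⟩|⟨rfl, rfl⟩|⟨rfl, rfl⟩
      · have e1 : PySem.List.sorted [(1:Int), (4:Int)] (fun x => x) true = [4, 1] := by decide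
        have e2 : PySem.List.maxD [(1:Int), (4:Int)] (fun x => x) 0 = 4 := by decide
        rw [e1, e2, hlen]
        norm_num
      · have e1 : PySem.List.sorted [(2:Int), (3:Int)] (fun x => x) true = [3, 2] := by decide
        have e2 : PySem.List.maxD [(2:Int), (3:Int)] (fun x => x) 0 = 3 := by decide
        rw [e1, e2, hlen]
        norm_num
      · have e1 : PySem.List.sorted [(3:Int), (2:Int)] (fun x => x) true = [3, 2] := by decide
        have e2 : PySem.List.maxD [(3:Int), (2:Int)] (fun x => x) 0 = 3 := by decide
        rw [e1, e2, hlen]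
        norm_num
      · have e1 : PySem.List.sorted [(4:Int), (1:Int)] (fun x => x) true = [4, 1] := by decide
        have e2 : PySem.List.maxD [(4:Int), (1:Int)] (fun x => x) 0 = 4 := by decide
        rw [e1, e2, hlen]
        norm_num
    · rw [hv] at hlen
      have bv1 := hpos v1 (by rw [hv]; simp)
      have bv2 := hpos v2 (by rw [hv]; simp)
      have bv3 := hpos v3 (by rw [hv]; simp)
      rw [h5] at hsum
      rw [hv] at hsum
      simp only [List.sum_cons, List.sum_nil, add_zero] at hsum
      norm_num at hsum
      have hc : (v1 = 1 ∧ v2 = 1 ∧ v3 = 3) ∨ (v1 = 1 ∧ v2 = 2 ∧ v3 = 2) ∨ (v1 = 1 ∧ v2 = 3 ∧ v3 = 1) ∨ (v1 = 2 ∧ v2 = 1 ∧ v3 = 2) ∨ (v1 = 2 ∧ v2 = 2 ∧ v3 = 1) ∨ (v1 = 3 ∧ v2 = 1 ∧ v3 = 1) := by omega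
      rcases hc with ⟨rfl, rfl, rfl⟩|⟨rfl, rfl, rfl⟩|⟨rfl, rfl, rfl⟩|⟨rfl, rfl, rfl⟩|⟨rfl, rfl, rfl⟩|⟨rfl, rfl, rfl⟩
      · have e1 : PySem.List.sorted [(1:Int), (1:Int), (3:Int)] (fun x => x) true = [3, 1, 1] := by decide
        have e2 : PySem.List.maxD [(1:Int), (1:Int), (3:Int)] (fun x => x) 0 = 3 := by decide
        rw [e1, e2, hlen]
        norm_num
      · have e1 : PySem.List.sorted [(1:Int), (2:Int), (2:Int)] (fun x => x) true = [2, 2, 1] := by decide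
        have e2 : PySem.List.maxD [(1:Int), (2:Int), (2:Int)] (fun x => x) 0 = 2 := by decide
        rw [e1, e2, hlen]
        norm_num
      · have e1 : PySem.List.sorted [(1:Int), (3:Int), (1:Int)] (fun x => x) true = [3, 1, 1] := by decide
        have e2 : PySem.List.maxD [(1:Int), (3:Int), (1:Int)] (fun x => x) 0 = 3 := by decide
        rw [e1, e2, hlen]
        norm_num
      · have e1 : PySem.List.sorted [(2:Int), (1:Int), (2:Int)] (fun x => x) true = [2, 2, 1] := by decide
        have e2 : PySem.List.maxD [(2:Int), (1:Int), (2:Int)] (fun x => x) 0 = 2 := by decide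
        rw [e1, e2, hlen]
        norm_num
      · have e1 : PySem.List.sorted [(2:Int), (2:Int), (1:Int)] (fun x => x) true = [2, 2, 1] := by decide
        have e2 : PySem.List.maxD [(2:Int), (2:Int), (1:Int)] (fun x => x) 0 = 2 := by decide
        rw [e1, e2, hlen]
        norm_num
      · have e1 : PySem.List.sorted [(3:Int), (1:Int), (1:Int)] (fun x => x) true = [3, 1, 1] := by decide
        have e2 : PySem.List.maxD [(3:Int), (1:Int), (1:Int)] (fun x => x) 0 = 3 := by decide
        rw [e1, e2, hlen]
        norm_num
    · rw [hv] at hlen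
      have bv1 := hpos v1 (by rw [hv]; simp)
      have bv2 := hpos v2 (by rw [hv]; simp)
      have bv3 := hpos v3 (by rw [hv]; simp)
      have bv4 := hpos v4 (by rw [hv]; simp)
      rw [h5] at hsum
      rw [hv] at hsum
      simp only [List.sum_cons, List.sum_nil, add_zero] at hsum
      norm_num at hsum
      have hc : (v1 = 1 ∧ v2 = 1 ∧ v3 = 1 ∧ v4 = 2) ∨ (v1 = 1 ∧ v2 = 1 ∧ v3 = 2 ∧ v4 = 1) ∨ (v1 = 1 ∧ v2 = 2 ∧ v3 = 1 ∧ v4 = 1) ∨ (v1 = 2 ∧ v2 = 1 ∧ v3 = 1 ∧ v4 = 1) := by omega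
      rcases hc with ⟨rfl, rfl, rfl, rfl⟩|⟨rfl, rfl, rfl, rfl⟩|⟨rfl, rfl, rfl, rfl⟩|⟨rfl, rfl, rfl, rfl⟩
      · have e1 : PySem.List.sorted [(1:Int), (1:Int), (1:Int), (2:Int)] (fun x => x) true = [2, 1, 1, 1] := by decide
        have e2 : PySem.List.maxD [(1:Int), (1:Int), (1:Int), (2:Int)] (fun x => x) 0 = 2 := by decide
        rw [e1, e2, hlen]
        norm_num
      · have e1 : PySem.List.sorted [(1:Int), (1:Int), (2:Int), (1:Int)] (fun x => x) true = [2, 1, 1, 1] := by decide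
        have e2 : PySem.List.maxD [(1:Int), (1:Int), (2:Int), (1:Int)] (fun x => x) 0 = 2 := by decide
        rw [e1, e2, hlen]
        norm_num
      · have e1 : PySem.List.sorted [(1:Int), (2:Int), (1:Int), (1:Int)] (fun x => x) true = [2, 1, 1, 1] := by decide
        have e2 : PySem.List.maxD [(1:Int), (2:Int), (1:Int), (1:Int)] (fun x => x) 0 = 2 := by decide
        rw [e1, e2, hlen]
        norm_num
      · have e1 : PySem.List.sorted [(2:Int), (1:Int), (1:Int), (1:Int)] (fun x => x) true = [2, 1, 1, 1] := by decide
        have e2 : PySem.List.maxD [(2:Int), (1:Int), (1:Int), (1:Int)] (fun x => x) 0 = 2 := by decide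
        rw [e1, e2, hlen]
        norm_num
    · rw [hv] at hlen
      have bv1 := hpos v1 (by rw [hv]; simp)
      have bv2 := hpos v2 (by rw [hv]; simp)
      have bv3 := hpos v3 (by rw [hv]; simp)
      have bv4 := hpos v4 (by rw [hv]; simp)
      have bv5 := hpos v5 (by rw [hv]; simp)
      rw [h5] at hsum
      rw [hv] at hsum
      simp only [List.sum_cons, List.sum_nil, add_zero] at hsum
      norm_num at hsum
      have hc : (v1 = 1 ∧ v2 = 1 ∧ v3 = 1 ∧ v4 = 1 ∧ v5 = 1) := by omega
      rcases hc with ⟨rfl, rfl, rfl, rfl, rfl⟩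
      · have e1 : PySem.List.sorted [(1:Int), (1:Int), (1:Int), (1:Int), (1:Int)] (fun x => x) true = [1, 1, 1, 1, 1] := by decide
        have e2 : PySem.List.maxD [(1:Int), (1:Int), (1:Int), (1:Int), (1:Int)] (fun x => x) 0 = 1 := by decide
        rw [e1, e2, hlen]
        norm_num
    · exfalso
      have hb : ∀ a ∈ v1 :: v2 :: v3 :: v4 :: v5 :: v6 :: rest, (1:Int) ≤ a := by
        intro a ha; exact hpos a (by rw [hv]; exact ha)
      have hr : 0 ≤ rest.sum := List.sum_nonneg (fun a ha => le_trans (by norm_num) (hb a (by simp [ha])))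
      have b1 := hb v1 (by simp); have b2 := hb v2 (by simp); have b3 := hb v3 (by simp)
      have b4 := hb v4 (by simp); have b5 := hb v5 (by simp); have b6 := hb v6 (by simp)
      rw [h5] at hsum; rw [hv] at hsum
      simp only [List.sum_cons] at hsum
      norm_num at hsum
      omega
  · rw [if_pos h5]
    have hs : ∀ L : List Int, PySem.List.sorted (PySem.Dict.counter t).values (fun x => x) true = L → L.sum = (t.length : Int) := by
      intro L hL
      rw [← hL]
      exact ((PySem.List.sorted_perm (PySem.Dict.counter t).values (fun x => x) true).sum_eq).trans (sum_values t)
    rw [if_neg (show ¬ PySem.List.sorted (PySem.Dict.counter t).values (fun x => x) true = ([5] : List Int) from fun h => h5 (by have hh := hs _ h; norm_num at hh; omega))]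
    rw [if_neg (show ¬ PySem.List.sorted (PySem.Dict.counter t).values (fun x => x) true = ([4, 1] : List Int) from fun h => h5 (by have hh := hs _ h; norm_num at hh; omega))]
    rw [if_neg (show ¬ PySem.List.sorted (PySem.Dict.counter t).values (fun x => x) true = ([3, 2] : List Int) from fun h => h5 (by have hh := hs _ h; norm_num at hh; omega))]
    rw [if_neg (show ¬ PySem.List.sorted (PySem.Dict.counter t).values (fun x => x) true = ([3, 1, 1] : List Int) from fun h => h5 (by have hh := hs _ h; norm_num at hh; omega))]
    rw [if_neg (show ¬ PySem.List.sorted (PySem.Dict.counter t).values (fun x => x) true = ([2, 2, 1] : List Int) from fun h => h5 (by have hh := hs _ h; norm_num at hh; omega))]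
    rw [if_neg (show ¬ PySem.List.sorted (PySem.Dict.counter t).values (fun x => x) true = ([2, 1, 1, 1] : List Int) from fun h => h5 (by have hh := hs _ h; norm_num at hh; omega))]
    rw [if_neg (show ¬ PySem.List.sorted (PySem.Dict.counter t).values (fun x => x) true = ([1, 1, 1, 1, 1] : List Int) from fun h => h5 (by have hh := hs _ h; norm_num at hh; omega))]
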